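-- pv_equiv track=rewrite | github.com/egeulgen/Bioinformatics_Specialization | Bioinformatics II/Week I/DeBruijnGraph.py | DeBruijnGraphFromGenome
-- ===== SOURCE A (Python) =====
-- def DeBruijnGraphFromGenome(Text, k):
--     unique_nodes = set()
--     LEN = len(Text) - k + 2
--     for i in range(LEN):
--         unique_nodes.add(Text[i:(i + k - 1)])
--     unique_nodes = list(unique_nodes)
--     node_pre = Text[:(k - 1)]
--     adj_list = {node_pre: []}
--     for i in range(1, LEN):
--         node_post = Text[i:(i + k - 1)]
--         adj_list[node_pre].append(node_post)
--         node_pre = node_post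
--         if not node_pre in adj_list.keys():
--             adj_list[node_pre] = []
--     return adj_list
-- ===== SOURCE B (Python) =====
-- def DeBruijnGraphFromGenome(Text, k):
--     nodes = [Text[i:i + k - 1] for i in range(len(Text) - k + 2)]
--     edges = list(zip(nodes, nodes[1:]))
--     return {v: [post for pre, post in edges if pre == v] for v in dict.fromkeys(nodes)}
-- ===== Notes on version B (the rewrite author's own statement) =====
-- stated objective: alternative
-- what changed: B replaces A's stateful streaming pass (carrying node_pre, appending to its list and conditionally creating keys) by a grouping decomposition: list all (k-1)-mer nodes, then for each distinct node (dict.fromkeys order) gather its successors from the edge pairs; Pre_ excludes degenerate inputs with len(Text) <= k-2, where no (k-1)-mer fits in the text and A's singleton graph on the clamped slice Text[:k-1] versus B's empty graph are two equally defensible conventions nobody would specify.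
-- outside the precondition, e.g. on DeBruijnGraphFromGenome('', 2): A returns {'': []}, B returns {}; on DeBruijnGraphFromGenome('AC', 5): A returns {'AC': []}, B returns {}
import Mathlib
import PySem

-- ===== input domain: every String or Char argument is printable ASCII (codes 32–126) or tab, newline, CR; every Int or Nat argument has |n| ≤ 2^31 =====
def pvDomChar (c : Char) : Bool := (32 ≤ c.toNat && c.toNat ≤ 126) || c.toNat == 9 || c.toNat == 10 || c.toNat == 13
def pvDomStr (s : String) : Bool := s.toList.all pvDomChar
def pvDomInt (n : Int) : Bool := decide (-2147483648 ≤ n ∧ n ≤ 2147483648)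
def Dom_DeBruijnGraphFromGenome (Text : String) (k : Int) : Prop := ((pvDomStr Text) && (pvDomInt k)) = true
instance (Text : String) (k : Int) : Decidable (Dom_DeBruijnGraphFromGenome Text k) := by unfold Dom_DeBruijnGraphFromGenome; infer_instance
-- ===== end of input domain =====

-- B replaces A's stateful streaming pass (running node_pre, per-step key creation) by a grouping
-- decomposition — all nodes listed once, then successors gathered per distinct node — and drops
-- A's unused unique_nodes set (objective: alternative).

-- ===== PORT A =====
def DeBruijnGraphFromGenome (Text : String) (k : Int) : List (String × List String) :=
  let LEN : Int := PySem.Str.len Text - k + 2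
  -- the unique_nodes set A builds and never uses
  let _unique_nodes : PySem.Set String :=
    (PySem.List.pyRange 0 LEN 1).foldl
      (fun s i => PySem.Set.add s (PySem.Str.slice Text (some i) (some (i + k - 1)))) []
  let nodePre := PySem.Str.slice Text none (some (k - 1))
  let adj0 : PySem.Dict String (List String) := PySem.Dict.empty.insert nodePre []
  let res :=
    (PySem.List.pyRange 1 LEN 1).foldl
      (fun (st : String × PySem.Dict String (List String)) i =>
        let nodePost := PySem.Str.slice Text (some i) (some (i + k - 1))
        -- adj_list[node_pre].append(node_post): the key st.1 is always present (loop invariant),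
        -- so Dict.modify with default [] is exact here
        let d1 := st.2.modify st.1 [] (fun l => l ++ [nodePost])
        let d2 := if d1.contains nodePost then d1 else d1.insert nodePost []
        (nodePost, d2))
      (nodePre, adj0)
  res.2.items

-- ===== PORT B =====
def DeBruijnGraphFromGenome_alt (Text : String) (k : Int) : List (String × List String) :=
  let nodes :=
    (PySem.List.pyRange 0 (PySem.Str.len Text - k + 2) 1).map
      (fun i => PySem.Str.slice Text (some i) (some (i + k - 1)))
  let edges := nodes.zip nodes.tail
  -- {v: [post for pre, post in edges if pre == v] for v in dict.fromkeys(nodes)}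
  ((PySem.List.dedup nodes).foldl
      (fun d v =>
        d.insert v (edges.filterMap (fun pq => if pq.1 = v then some pq.2 else none)))
      PySem.Dict.empty).items

-- ===== PRECONDITION & SPEC =====
-- Pre_ excludes the degenerate inputs with len(Text) <= k-2: no (k-1)-mer fits in the text there,
-- and A's singleton graph on the clamped slice Text[:k-1] versus B's empty graph are two equally
-- defensible conventions nobody would specify.
def Pre_DeBruijnGraphFromGenome (Text : String) (k : Int) : Prop := k - 1 ≤ PySem.Str.len Text
instance (Text : String) (k : Int) : Decidable (Pre_DeBruijnGraphFromGenome Text k) := by unfold Pre_DeBruijnGraphFromGenome; infer_instance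

def pvWitness_DeBruijnGraphFromGenome : String × Int := ("TAATGCCATGGGATGTT", 3)

def Spec_DeBruijnGraphFromGenome (Text : String) (k : Int) (out : List (String × List String)) : Prop := out = DeBruijnGraphFromGenome_alt Text k
instance (Text : String) (k : Int) (out : List (String × List String)) : Decidable (Spec_DeBruijnGraphFromGenome Text k out) := by unfold Spec_DeBruijnGraphFromGenome; infer_instance

-- ===== CLAIM (what is proved, stated in full; the proofs are below) =====
def Claim_equal_DeBruijnGraphFromGenome : Prop := ∀ (Text : String) (k : Int), Dom_DeBruijnGraphFromGenome Text k → Pre_DeBruijnGraphFromGenome Text k → Spec_DeBruijnGraphFromGenome Text k (DeBruijnGraphFromGenome Text k)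

-- ===== LEMMAS AND PROOFS =====

-- conditional key creation, as A performs it
def pvCondIns (d : PySem.Dict String (List String)) (v : String) : PySem.Dict String (List String) :=
  if d.contains v then d else d.insert v []

-- appending one edge, as both programs perform it
def pvEdge (d : PySem.Dict String (List String)) (p x : String) : PySem.Dict String (List String) :=
  d.modify p [] (fun l => l ++ [x])

-- A's loop body, abstracted over the already-sliced node
def pvAStep (st : String × PySem.Dict String (List String)) (post : String) :
    String × PySem.Dict String (List String) :=
  (post, pvCondIns (pvEdge st.2 st.1 post) post)

-- the successor gather B performs per node
def pvFilt (ps : List (String × String)) (v : String) : List String :=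
  ps.filterMap (fun pq => if pq.1 = v then some pq.2 else none)

-- B's unconditional insert of [] equals pvCondIns while all stored values are []
lemma pv_insert_eq_condIns (d : PySem.Dict String (List String)) (v : String)
    (hinv : ∀ p ∈ d.items, p.2 = ([] : List String)) : d.insert v [] = pvCondIns d v := by
  unfold pvCondIns
  split
  · next hc =>
    apply PySem.Dict.ext
    rw [PySem.Dict.items_insert_of_contains (h := hc)]
    conv_rhs => rw [← List.map_id d.items]
    apply List.map_congr_left
    intro p hp
    by_cases h1 : p.1 = v
    · simp [h1, Prod.ext_iff, (hinv p hp)]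
    · simp [h1]
  · rfl

lemma pv_keyfold_eq (l : List String) :
    ∀ (d : PySem.Dict String (List String)), (∀ p ∈ d.items, p.2 = ([] : List String)) →
      l.foldl (fun d v => d.insert v []) d = l.foldl pvCondIns d := by
  induction l with
  | nil => intro d _; rfl
  | cons v l ih =>
    intro d hinv
    simp only [List.foldl_cons]
    rw [pv_insert_eq_condIns d v hinv]
    apply ih
    intro p hp
    unfold pvCondIns at hp
    split at hp
    · exact hinv p hp
    · rcases (PySem.Dict.mem_items_insert _ _ _ _).mp hp with h | h
      · simp [h]
      · exact hinv p h.1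

lemma pv_contains_condIns (d : PySem.Dict String (List String)) (v w : String)
    (h : d.contains w = true) : (pvCondIns d v).contains w = true := by
  unfold pvCondIns
  split
  · exact h
  · rw [PySem.Dict.contains_insert]; simp [h]

lemma pv_contains_condIns_self (d : PySem.Dict String (List String)) (v : String) :
    (pvCondIns d v).contains v = true := by
  unfold pvCondIns
  split
  · assumption
  · rw [PySem.Dict.contains_insert]; simp

-- pvCondIns commutes with an edge append at a present key
lemma pv_comm (d : PySem.Dict String (List String)) (p x v : String) (hp : d.contains p = true) :
    pvCondIns (pvEdge d p x) v = pvEdge (pvCondIns d v) p x := by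
  by_cases hv : d.contains v = true
  · have h1 : (pvEdge d p x).contains v = true := by
      simp [pvEdge, PySem.Dict.contains_modify, hv]
    simp [pvCondIns, h1, hv]
  · have hvp : v ≠ p := fun h => hv (h ▸ hp)
    have hv' : d.contains v = false := by simpa using hv
    have h1 : (pvEdge d p x).contains v = false := by
      simp [pvEdge, PySem.Dict.contains_modify, hv', hvp]
    simp only [pvCondIns, h1, hv, Bool.false_eq_true, if_false]
    show (d.modify p [] (fun l => l ++ [x])).insert v [] = (d.insert v []).modify p [] (fun l => l ++ [x])
    have hmod : ∀ (d' : PySem.Dict String (List String)),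
        d'.modify p [] (fun l => l ++ [x]) = d'.insert p (d'.getD p [] ++ [x]) := fun _ => rfl
    rw [hmod, hmod, PySem.Dict.getD_insert_of_ne _ _ _ hvp.symm]
    apply PySem.Dict.ext
    have hcp : (d.insert v ([] : List String)).contains p = true := by
      simp [PySem.Dict.contains_insert, hp]
    have hcv : (d.insert p (d.getD p [] ++ [x])).contains v = false := by
      simp [PySem.Dict.contains_insert, hv', hvp]
    rw [PySem.Dict.items_insert_of_not_contains _ _ hcv,
        PySem.Dict.items_insert_of_contains (h := hp),
        PySem.Dict.items_insert_of_contains (h := hcp),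
        PySem.Dict.items_insert_of_not_contains _ _ hv',
        List.map_append]
    simp [hvp]

lemma pv_comm_fold (l : List String) :
    ∀ (d : PySem.Dict String (List String)) (p x : String), d.contains p = true →
      l.foldl pvCondIns (pvEdge d p x) = pvEdge (l.foldl pvCondIns d) p x := by
  induction l with
  | nil => intro d p x _; rfl
  | cons v l ih =>
    intro d p x hp
    simp only [List.foldl_cons]
    rw [pv_comm d p x v hp, ih _ _ _ (pv_contains_condIns d v p hp)]

-- main invariant of A's loop: final dict = keys phase, then edges phase
lemma pv_main (rest : List String) :
    ∀ (pre : String) (d : PySem.Dict String (List String)), d.contains pre = true →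
      (rest.foldl pvAStep (pre, d)).2
        = ((pre :: rest).zip rest).foldl (fun d pq => pvEdge d pq.1 pq.2)
            (rest.foldl pvCondIns d) := by
  induction rest with
  | nil => intro pre d _; rfl
  | cons post rest ih =>
    intro pre d hp
    simp only [List.foldl_cons, List.zip_cons_cons]
    have h1 : pvAStep (pre, d) post = (post, pvCondIns (pvEdge d pre post) post) := rfl
    rw [h1, ih post _ (pv_contains_condIns_self _ post)]
    rw [pv_comm d pre post post hp, pv_comm_fold rest _ pre post (pv_contains_condIns d post pre hp)]

lemma pv_slice_zero (s : String) (b : Option Int) :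
    PySem.Str.slice s (some 0) b = PySem.Str.slice s none b := by
  simp [PySem.Str.slice]

-- one edge append rewrites the items pointwise
lemma pv_items_edge (d : PySem.Dict String (List String)) (p x : String)
    (hc : d.contains p = true) (hnd : d.keys.Nodup) :
    (pvEdge d p x).items
      = d.items.map (fun kv => if kv.1 = p then (kv.1, kv.2 ++ [x]) else kv) := by
  show (d.insert p (d.getD p [] ++ [x])).items = _
  rw [PySem.Dict.items_insert_of_contains (h := hc)]
  apply List.map_congr_left
  intro kv hkv
  by_cases h1 : kv.1 = p
  · have h2 : d.getD kv.1 [] = kv.2 :=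
      PySem.Dict.getD_of_mem_items d (show (kv.1, kv.2) ∈ d.items by simpa using hkv) hnd []
    simp [h1, ← h2]
  · simp [h1]

-- the edges phase, characterised: each key gathers its successors in order
lemma pv_edgefold_items (ps : List (String × String)) :
    ∀ (d : PySem.Dict String (List String)), (∀ pq ∈ ps, d.contains pq.1 = true) → d.keys.Nodup →
      (ps.foldl (fun d pq => pvEdge d pq.1 pq.2) d).items
        = d.items.map (fun kv => (kv.1, kv.2 ++ pvFilt ps kv.1)) := by
  induction ps with
  | nil =>
    intro d _ _
    simp only [List.foldl_nil]
    conv_lhs => rw [← List.map_id d.items]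
    exact List.map_congr_left (fun kv _ => by simp [pvFilt])
  | cons pq ps ih =>
    intro d hcont hnd
    simp only [List.foldl_cons]
    have hc : d.contains pq.1 = true := hcont pq (by simp)
    have hcont' : ∀ q ∈ ps, (pvEdge d pq.1 pq.2).contains q.1 = true := by
      intro q hq
      have := hcont q (by simp [hq])
      simp [pvEdge, PySem.Dict.contains_modify, this]
    have hnd' : (pvEdge d pq.1 pq.2).keys.Nodup := by
      show ((d.insert pq.1 _).keys).Nodup
      exact PySem.Dict.nodup_keys_insert _ _ _ hnd
    rw [ih _ hcont' hnd', pv_items_edge d pq.1 pq.2 hc hnd, List.map_map]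
    apply List.map_congr_left
    intro kv _
    by_cases h1 : kv.1 = pq.1
    · simp [Function.comp, h1, pvFilt, List.append_assoc]
    · simp [Function.comp, h1, pvFilt, Ne.symm h1]

-- every value stored by the keys phase is []
lemma pv_keyfold_values_nil (l : List String) :
    ∀ (d : PySem.Dict String (List String)), (∀ p ∈ d.items, p.2 = ([] : List String)) →
      ∀ p ∈ (l.foldl (fun d v => d.insert v []) d).items, p.2 = ([] : List String) := by
  induction l with
  | nil => intro d hinv; exact hinv
  | cons v l ih =>
    intro d hinv
    simp only [List.foldl_cons]
    apply ih
    intro p hp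
    rcases (PySem.Dict.mem_items_insert _ _ _ _).mp hp with h | h
    · simp [h]
    · exact hinv p h.1

-- the keys phase, characterised: items = first-occurrence distinct nodes, each with []
lemma pv_keyfold_items (l : List String) :
    ((l.foldl (fun d v => d.insert v []) PySem.Dict.empty).items)
      = (PySem.List.dedup l).map (fun v => (v, ([] : List String))) := by
  set d := l.foldl (fun d v => d.insert v ([] : List String)) PySem.Dict.empty with hd
  have hk : d.keys = PySem.List.dedup l := by
    rw [hd, PySem.Dict.keys_foldl_insert (f := fun _ _ => ([] : List String))]
    simp [PySem.Dict.keys_empty, PySem.Set.update_nil_left]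
  have hnd : d.keys.Nodup := by rw [hk]; exact PySem.List.nodup_dedup l
  have hval : ∀ p ∈ d.items, p.2 = ([] : List String) :=
    pv_keyfold_values_nil l PySem.Dict.empty (by intro p hp; simp [PySem.Dict.empty] at hp)
  rw [PySem.Dict.items_eq_map_keys d hnd [], hk]
  apply List.map_congr_left
  intro v hv
  have hv' : v ∈ d.keys := by rw [hk]; exact hv
  have : ∃ p ∈ d.items, p.1 = v := by
    have : v ∈ d.items.map (·.1) := by simpa [PySem.Dict.keys] using hv'
    simpa using this
  rcases this with ⟨p, hp, hp1⟩
  have hgd : d.getD p.1 [] = p.2 :=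
    PySem.Dict.getD_of_mem_items d (show (p.1, p.2) ∈ d.items by simpa using hp) hnd []
  simp [← hp1, hgd, hval p hp]

-- ===== VERDICT (by name: the statements are the Claim_ definitions above) =====
theorem DeBruijnGraphFromGenome_spec : Claim_equal_DeBruijnGraphFromGenome := by
  intro Text k _ hpre
  unfold Pre_DeBruijnGraphFromGenome at hpre
  unfold Spec_DeBruijnGraphFromGenome
  unfold DeBruijnGraphFromGenome DeBruijnGraphFromGenome_alt
  simp only []
  set LEN : Int := PySem.Str.len Text - k + 2 with hLEN
  set slice := fun i : Int => PySem.Str.slice Text (some i) (some (i + k - 1)) with hslice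
  set nodePre := PySem.Str.slice Text none (some (k - 1)) with hnp
  have hpos : 0 < LEN := by omega
  have hcons : PySem.List.pyRange 0 LEN 1 = 0 :: PySem.List.pyRange 1 LEN 1 := by
    have := PySem.List.pyRange_one_cons (a := 0) (b := LEN) hpos
    simpa using this
  have hbody : (fun (st : String × PySem.Dict String (List String)) (i : Int) =>
      let nodePost := slice i
      let d1 := st.2.modify st.1 [] (fun l => l ++ [nodePost])
      let d2 := if d1.contains nodePost then d1 else d1.insert nodePost []
      (nodePost, d2)) = (fun st i => pvAStep st (slice i)) := rfl
  rw [hbody, ← List.foldl_map (f := slice) (g := pvAStep)]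
  set tailNodes := (PySem.List.pyRange 1 LEN 1).map slice with htn
  have hsl0 : slice 0 = nodePre := by
    rw [hslice]; simp only []
    rw [show (0:Int) + k - 1 = k - 1 by ring, pv_slice_zero, hnp]
  have hnodes : (PySem.List.pyRange 0 LEN 1).map slice = nodePre :: tailNodes := by
    rw [hcons, List.map_cons, hsl0, htn]
  have hc0 : (PySem.Dict.empty.insert nodePre ([] : List String)).contains nodePre = true :=
    PySem.Dict.contains_insert_self _ _ _
  rw [pv_main tailNodes nodePre _ hc0, hnodes]
  simp only [List.tail_cons]
  -- identify the keys-phase dict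
  have hci : pvCondIns PySem.Dict.empty nodePre = PySem.Dict.empty.insert nodePre [] := by
    simp [pvCondIns]
  have hkey : tailNodes.foldl pvCondIns (PySem.Dict.empty.insert nodePre [])
      = (nodePre :: tailNodes).foldl (fun d v => d.insert v []) PySem.Dict.empty := by
    rw [pv_keyfold_eq (nodePre :: tailNodes) PySem.Dict.empty
        (by intro p hp; simp [PySem.Dict.empty] at hp)]
    rw [List.foldl_cons, hci]
  rw [hkey]
  set keydict := (nodePre :: tailNodes).foldl
      (fun d v => d.insert v ([] : List String)) PySem.Dict.empty with hkd
  set ps := (nodePre :: tailNodes).zip tailNodes with hps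
  have hknd : keydict.keys.Nodup :=
    PySem.Dict.nodup_keys_foldl_insert (nodePre :: tailNodes) (fun _ _ => []) PySem.Dict.empty
      (PySem.Dict.nodup_keys_empty)
  have hkitems : keydict.items
      = (PySem.List.dedup (nodePre :: tailNodes)).map (fun v => (v, ([] : List String))) :=
    pv_keyfold_items (nodePre :: tailNodes)
  have hkcont : ∀ pq ∈ ps, keydict.contains pq.1 = true := by
    intro pq hpq
    have h1 : pq.1 ∈ nodePre :: tailNodes := (List.of_mem_zip hpq).1
    have h2 : pq.1 ∈ keydict.keys := by
      rw [hkd, PySem.Dict.keys_foldl_insert (f := fun _ _ => ([] : List String))]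
      simp only [PySem.Dict.keys_empty, PySem.Set.update_nil_left]
      rw [PySem.Set.mem_ofList]
      exact h1
    exact (PySem.Dict.contains_iff_mem_keys _ _).mpr h2
  have hA : (ps.foldl (fun d pq => pvEdge d pq.1 pq.2) keydict).items
      = (PySem.List.dedup (nodePre :: tailNodes)).map (fun v => (v, pvFilt ps v)) := by
    rw [pv_edgefold_items _ _ hkcont hknd, hkitems, List.map_map]
    exact List.map_congr_left (fun v _ => by simp [Function.comp])
  have hB : ((PySem.List.dedup (nodePre :: tailNodes)).foldl
      (fun d v => d.insert v (pvFilt ps v)) PySem.Dict.empty).items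
      = (PySem.List.dedup (nodePre :: tailNodes)).map (fun v => (v, pvFilt ps v)) := by
    rw [PySem.Dict.items_foldl_insert_fresh (PySem.List.dedup (nodePre :: tailNodes))
        (fun v => v) (fun v => pvFilt ps v) PySem.Dict.empty
        (by intro a _; simp [PySem.Dict.contains_empty])
        (by simp)]
    simp [PySem.Dict.empty]
  rw [hA]
  show _ = ((PySem.List.dedup (nodePre :: tailNodes)).foldl
      (fun d v => d.insert v (pvFilt ps v)) PySem.Dict.empty).items
  rw [hB]
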